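-- pv_equiv track=rewrite | github.com/nicololuescher/adventofcode | day12/day12.py | get_start_and_end
-- ===== SOURCE A (Python) =====
-- def get_start_and_end(data):
--     start = None
--     end = None
--     for x in range(len(data)):
--         for y in range(len(data[0])):
--             if data[x][y] == 83:
--                 start = (x, y)
--             if data[x][y] == 69:
--                 end = (x, y)
--     return start, end
-- ===== SOURCE B (Python) =====
-- def get_start_and_end(data):
--     def _find_last(target):
--         for x in reversed(range(len(data))):
--             for y in reversed(range(len(data[0]))):
--                 if data[x][y] == target:
--                     return (x, y)
--         return None
--     return _find_last(83), _find_last(69)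
-- ===== Notes on version B (the rewrite author's own statement) =====
-- stated objective: alternative
-- what changed: One forward nested loop recording last occurrences of both markers is replaced by two independent backward scans (reversed row-major order) that each return the first hit, i.e. the last occurrence, with early exit.
import Mathlib
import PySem

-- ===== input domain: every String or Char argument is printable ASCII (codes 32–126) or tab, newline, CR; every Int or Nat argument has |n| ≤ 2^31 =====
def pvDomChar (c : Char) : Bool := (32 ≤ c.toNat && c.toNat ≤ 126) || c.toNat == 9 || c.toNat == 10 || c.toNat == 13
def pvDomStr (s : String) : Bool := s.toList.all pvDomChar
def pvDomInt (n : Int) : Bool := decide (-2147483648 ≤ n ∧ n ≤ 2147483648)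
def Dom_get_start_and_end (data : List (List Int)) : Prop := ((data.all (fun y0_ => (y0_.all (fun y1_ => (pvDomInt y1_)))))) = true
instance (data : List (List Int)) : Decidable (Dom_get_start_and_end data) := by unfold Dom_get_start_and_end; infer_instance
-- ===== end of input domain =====

-- B replaces A's single forward nested loop (recording the last 83 and last 69 seen) by two
-- independent backward scans with early exit; return values only, no mutation involved.

-- ===== PORT A =====
-- cell access data[x][y]; the .getD defaults are never hit inside Pre_ (Python raises IndexError there)
def pvCell (data : List (List Int)) (x y : Int) : Int :=
  (PySem.List.pyGet? ((PySem.List.pyGet? data x).getD []) y).getD 0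

def get_start_and_end (data : List (List Int)) : (Option (Int × Int)) × (Option (Int × Int)) :=
  (PySem.List.pyRange 0 (data.length : Int) 1).foldl
    (fun s x =>
      (PySem.List.pyRange 0 (((PySem.List.pyGet? data 0).getD []).length : Int) 1).foldl
        (fun s y =>
          ((if pvCell data x y = 83 then some (x, y) else s.1),
           (if pvCell data x y = 69 then some (x, y) else s.2)))
        s)
    (none, none)

-- ===== PORT B =====
-- backward scan: first hit in reversed row-major order = last occurrence
def pvFindLast (data : List (List Int)) (target : Int) : Option (Int × Int) :=
  ((PySem.List.pyRange 0 (data.length : Int) 1).reverse).findSome? (fun x =>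
    ((PySem.List.pyRange 0 (((PySem.List.pyGet? data 0).getD []).length : Int) 1).reverse).findSome? (fun y =>
      if pvCell data x y = target then some (x, y) else none))

def get_start_and_end_alt (data : List (List Int)) : (Option (Int × Int)) × (Option (Int × Int)) :=
  (pvFindLast data 83, pvFindLast data 69)

-- ===== PRECONDITION & SPEC =====
-- Pre_ excludes ragged grids in which some row is shorter than the first row: there the
-- Python A raises IndexError (data[x][y] is read for every y < len(data[0])).
def Pre_get_start_and_end (data : List (List Int)) : Prop :=
  ∀ row ∈ data, ((data.head?.getD []).length) ≤ row.length
instance (data : List (List Int)) : Decidable (Pre_get_start_and_end data) := by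
  unfold Pre_get_start_and_end; infer_instance

def pvWitness_get_start_and_end : List (List Int) := [[83, 1], [2, 69]]

def Spec_get_start_and_end (data : List (List Int)) (out : (Option (Int × Int)) × (Option (Int × Int))) : Prop := out = get_start_and_end_alt data
instance (data : List (List Int)) (out : (Option (Int × Int)) × (Option (Int × Int))) : Decidable (Spec_get_start_and_end data out) := by unfold Spec_get_start_and_end; infer_instance

-- ===== CLAIM (what is proved, stated in full; the proofs are below) =====
def Claim_equal_get_start_and_end : Prop := ∀ (data : List (List Int)), Dom_get_start_and_end data → Pre_get_start_and_end data → Spec_get_start_and_end data (get_start_and_end data)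

-- ===== LEMMAS AND PROOFS =====

-- componentwise product fold
theorem pv_foldl_prod {α β δ : Type} (f : α → δ → α) (g : β → δ → β) (l : List δ) (s : α × β) :
    l.foldl (fun s p => (f s.1 p, g s.2 p)) s = (l.foldl f s.1, l.foldl g s.2) := by
  induction l generalizing s with
  | nil => rfl
  | cons a l ih => simp [List.foldl, ih]

-- a left fold that keeps overwriting with the latest hit equals the first hit on the reversed list
theorem pv_foldl_or_find {δ γ : Type} (g : δ → Option γ) (l : List δ) (s0 : Option γ) :
    l.foldl (fun s y => (g y).or s) s0 = (l.reverse.findSome? g).or s0 := by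
  induction l generalizing s0 with
  | nil => rfl
  | cons y l ih =>
      simp only [List.foldl, List.reverse_cons, List.findSome?_append, ih]
      cases hy : g y <;> cases l.reverse.findSome? g <;> simp [hy]

-- overwrite-on-match fold = reversed first-match search
theorem pv_foldl_if_find {δ γ : Type} (P : δ → Prop) [DecidablePred P] (v : δ → γ)
    (l : List δ) (s0 : Option γ) :
    l.foldl (fun s y => if P y then some (v y) else s) s0
      = (l.reverse.findSome? (fun y => if P y then some (v y) else none)).or s0 := by
  have h : (fun (s : Option γ) (y : δ) => if P y then some (v y) else s)
      = fun s y => ((fun y => if P y then some (v y) else none) y).or s := by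
    funext s y; by_cases hx : P y <;> simp [hx]
  rw [h, pv_foldl_or_find]

-- generic core: A's nested overwrite-fold = B's pair of reversed searches
theorem pv_key (xs ys : List Int) (c : Int → Int → Int) :
    xs.foldl (fun s x => ys.foldl
        (fun s y => ((if c x y = 83 then some (x, y) else s.1),
                     (if c x y = 69 then some (x, y) else s.2))) s) (none, none)
      = (xs.reverse.findSome? (fun x => ys.reverse.findSome? (fun y => if c x y = 83 then some (x, y) else none)),
         xs.reverse.findSome? (fun x => ys.reverse.findSome? (fun y => if c x y = 69 then some (x, y) else none))) := by
  have hinner : (fun (s : Option (Int × Int) × Option (Int × Int)) (x : Int) => ys.foldl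
        (fun s y => ((if c x y = 83 then some ((x : Int), (y : Int)) else s.1),
                     (if c x y = 69 then some (x, y) else s.2))) s)
      = fun s x =>
          ((ys.reverse.findSome? (fun y => if c x y = 83 then some (x, y) else none)).or s.1,
           (ys.reverse.findSome? (fun y => if c x y = 69 then some (x, y) else none)).or s.2) := by
    funext s x
    refine (pv_foldl_prod (fun a y => if c x y = 83 then some ((x : Int), (y : Int)) else a)
      (fun a y => if c x y = 69 then some ((x : Int), (y : Int)) else a) ys s).trans ?_
    exact Prod.ext
      (pv_foldl_if_find (fun y => c x y = 83) (fun y => ((x : Int), (y : Int))) ys s.1)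
      (pv_foldl_if_find (fun y => c x y = 69) (fun y => ((x : Int), (y : Int))) ys s.2)
  rw [hinner]
  refine (pv_foldl_prod
    (fun a x => (ys.reverse.findSome? (fun y => if c x y = 83 then some ((x : Int), (y : Int)) else none)).or a)
    (fun a x => (ys.reverse.findSome? (fun y => if c x y = 69 then some ((x : Int), (y : Int)) else none)).or a)
    xs (none, none)).trans ?_
  exact Prod.ext
    ((pv_foldl_or_find (fun x => ys.reverse.findSome? (fun y => if c x y = 83 then some ((x : Int), (y : Int)) else none)) xs none).trans Option.or_none)
    ((pv_foldl_or_find (fun x => ys.reverse.findSome? (fun y => if c x y = 69 then some ((x : Int), (y : Int)) else none)) xs none).trans Option.or_none)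

-- ===== VERDICT (by name: the statement is the Claim_ definition above) =====
theorem get_start_and_end_spec : Claim_equal_get_start_and_end := by
  intro data _ _
  unfold Spec_get_start_and_end get_start_and_end get_start_and_end_alt pvFindLast
  exact pv_key _ _ (pvCell data)
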